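-- pv_equiv track=rewrite | github.com/VitorYunguiar/bot-maxima | ingest.py | _get_heading_context_for_position
-- ===== SOURCE A (Python) =====
-- def _get_heading_context_for_position(
--     headings: list[tuple[int, str, int]],
--     position: int,
-- ) -> str:
--     """Retorna a hierarquia de headings ativa em uma posicao do texto."""
--     active: dict[int, str] = {}
--     for level, heading_text, hpos in headings:
--         if hpos > position:
--             break
--         active[level] = heading_text
--         # Limpar headings mais profundos quando um mais alto aparece
--         for deeper in list(active):
--             if deeper > level:
--                 del active[deeper]
--
--     if not active:
--         return ""
--     parts = [active[level] for level in sorted(active)]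
--     return " > ".join(parts)
-- ===== SOURCE B (Python) =====
-- def _get_heading_context_for_position(
--     headings: list[tuple[int, str, int]],
--     position: int,
-- ) -> str:
--     """Retorna a hierarquia de headings ativa em uma posicao do texto."""
--     # Stage 1: take the prefix of headings at or before the position.
--     prefix = []
--     for h in headings:
--         if h[2] > position:
--             break
--         prefix.append(h)
--     # Stage 2: a heading is active iff every later heading in the prefix is
--     # strictly deeper, i.e. its level is a strict suffix-minimum scanning
--     # right-to-left; collect those texts and reverse into document order.
--     parts = []
--     min_level = None
--     for level, text, _ in reversed(prefix):
--         if min_level is None or level < min_level: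
--             parts.append(text)
--             min_level = level
--     return " > ".join(reversed(parts))
-- ===== Notes on version B (the rewrite author's own statement) =====
-- stated objective: alternative
-- what changed: Replaces the forward pass that mutates a level-keyed dict (insert, delete deeper keys, final sort) by a two-stage algorithm: truncate the list at the position, then a backward scan collecting the strict suffix-minima of levels, whose texts reversed are exactly the active hierarchy.
import Mathlib
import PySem

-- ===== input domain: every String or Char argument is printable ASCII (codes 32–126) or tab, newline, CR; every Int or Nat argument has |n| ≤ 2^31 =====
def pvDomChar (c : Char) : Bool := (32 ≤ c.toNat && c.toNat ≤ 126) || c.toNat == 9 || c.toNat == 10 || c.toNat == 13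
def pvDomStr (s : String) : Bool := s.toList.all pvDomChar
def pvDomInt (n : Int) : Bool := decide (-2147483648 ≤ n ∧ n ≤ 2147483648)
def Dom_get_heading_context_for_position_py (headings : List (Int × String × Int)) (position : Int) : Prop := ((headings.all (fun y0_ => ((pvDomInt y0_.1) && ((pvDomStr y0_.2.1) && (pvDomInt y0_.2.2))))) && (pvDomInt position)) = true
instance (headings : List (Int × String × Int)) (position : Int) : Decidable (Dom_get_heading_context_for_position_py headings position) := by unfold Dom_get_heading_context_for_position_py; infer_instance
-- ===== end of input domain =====

-- B replaces A's forward pass over a level-keyed dict (insert, delete-deeper scan, final sort)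
-- by two stages: truncate the list at the position, then a backward scan collecting the strict
-- suffix-minima of levels — an alternative algorithm with no mutable hierarchy structure.

-- ===== PORT A =====
-- inner loop: 'for deeper in list(active): if deeper > level: del active[deeper]'
def pvADelDeeper (level : Int) (ks : List Int) (d : PySem.Dict Int String) : PySem.Dict Int String :=
  ks.foldl (fun acc k => if k > level then acc.erase k else acc) d

def pvALoop (position : Int) : List (Int × String × Int) → PySem.Dict Int String → PySem.Dict Int String
  | [], d => d
  | (level, text, hpos) :: rest, d =>
    if hpos > position then d
    else
      let d1 := d.insert level text
      pvALoop position rest (pvADelDeeper level d1.keys d1)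

def get_heading_context_for_position_py (headings : List (Int × String × Int)) (position : Int) : String :=
  let active := pvALoop position headings PySem.Dict.empty
  if active.items = [] then ""
  else PySem.Str.join " > " ((PySem.List.sorted active.keys (fun x => x) false).map (fun l => active.getD l ""))

-- ===== PORT B =====
-- stage 1: 'for h in headings: if h[2] > position: break; prefix.append(h)'
def pvPrefix (position : Int) : List (Int × String × Int) → List (Int × String × Int)
  | [] => []
  | h :: rest => if h.2.2 > position then [] else h :: pvPrefix position rest

-- stage 2 step: 'if min_level is None or level < min_level: parts.append(text); min_level = level'
def pvScanStep (st : Option Int × List String) (h : Int × String × Int) : Option Int × List String :=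
  if (match st.1 with | none => true | some v => decide (h.1 < v)) then (some h.1, st.2 ++ [h.2.1])
  else st

def get_heading_context_for_position_py_alt (headings : List (Int × String × Int)) (position : Int) : String :=
  PySem.Str.join " > " (((pvPrefix position headings).reverse.foldl pvScanStep (none, [])).2.reverse)

-- ===== PRECONDITION & SPEC =====
def Spec_get_heading_context_for_position_py (headings : List (Int × String × Int)) (position : Int) (out : String) : Prop := out = get_heading_context_for_position_py_alt headings position
instance (headings : List (Int × String × Int)) (position : Int) (out : String) : Decidable (Spec_get_heading_context_for_position_py headings position out) := by unfold Spec_get_heading_context_for_position_py; infer_instance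

-- ===== CLAIM (what is proved, stated in full; the proofs are below) =====
def Claim_equal_get_heading_context_for_position_py : Prop := ∀ (headings : List (Int × String × Int)) (position : Int), Dom_get_heading_context_for_position_py headings position → Spec_get_heading_context_for_position_py headings position (get_heading_context_for_position_py headings position)

-- ===== LEMMAS AND PROOFS =====

-- proof-side bridge structure: the monotone stack A's dict is permutation-equivalent to
def pvStkPop (level : Int) : List (Int × String) → List (Int × String)
  | [] => []
  | (l, t) :: rest => if l > level then pvStkPop level rest else (l, t) :: rest

def pvStkStep (level : Int) (text : String) (s : List (Int × String)) : List (Int × String) :=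
  match pvStkPop level s with
  | (l, t) :: tail => if l = level then (level, text) :: tail else (level, text) :: (l, t) :: tail
  | [] => [(level, text)]

def pvStkLoop (position : Int) : List (Int × String × Int) → List (Int × String) → List (Int × String)
  | [], s => s
  | (level, text, hpos) :: rest, s =>
    if hpos > position then s
    else pvStkLoop position rest (pvStkStep level text s)

-- minimum level of a heading list (none when empty)
def pvOMin : Option Int → Option Int → Option Int
  | none, b => b
  | some a, none => some a
  | some a, some b => some (min a b)

def pvMMin : List (Int × String × Int) → Option Int
  | [] => none
  | h :: rest => pvOMin (some h.1) (pvMMin rest)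

def pvKeep (m : Option Int) (p : Int × String) : Bool :=
  match m with | none => true | some v => decide (p.1 < v)

theorem pvKeep_none (p : Int × String) : pvKeep none p = true := rfl
theorem pvKeep_some (v : Int) (p : Int × String) : pvKeep (some v) p = decide (p.1 < v) := rfl

-- the common characterization: survivors = headings strictly below every later level,
-- listed from last to first (decreasing levels head-first)
def pvSurv : List (Int × String × Int) → List (Int × String)
  | [] => []
  | h :: rest =>
    match pvMMin rest with
    | none => [(h.1, h.2.1)]
    | some v => if h.1 < v then pvSurv rest ++ [(h.1, h.2.1)] else pvSurv rest

-- the loop invariant: the dict's keys are distinct, the stack is strictly decreasing in level,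
-- and the reversed stack is a permutation of the dict's item list
def pvInv (d : PySem.Dict Int String) (s : List (Int × String)) : Prop :=
  d.keys.Nodup ∧ s.Pairwise (fun a b => b.1 < a.1) ∧ s.reverse.Perm d.items

theorem pvItems_delDeeper (level : Int) (ks : List Int) (d : PySem.Dict Int String) :
    (pvADelDeeper level ks d).items
      = d.items.filter (fun p => !(decide (p.1 ∈ ks) && decide (level < p.1))) := by
  induction ks generalizing d with
  | nil => simp [pvADelDeeper]
  | cons k ks ih =>
    simp only [pvADelDeeper, List.foldl_cons] at *
    rw [ih]
    by_cases hk : k > level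
    · simp only [hk, if_pos]
      show (PySem.Dict.mk _).items.filter _ = _
      simp only [List.filter_filter]
      apply List.filter_congr
      intro p _
      by_cases h1 : p.1 = k <;> by_cases h2 : level < p.1 <;>
        simp [h1, h2, List.mem_cons] <;> omega
    · simp only [hk, if_false]
      apply List.filter_congr
      intro p _
      by_cases h1 : p.1 = k <;> by_cases h2 : level < p.1 <;>
        simp [h1, h2, List.mem_cons] <;> omega

theorem pvReplace_filter_perm (l : List (Int × String)) (level : Int) (text : String)
    (h : (l.map Prod.fst).Nodup) (hmem : level ∈ l.map Prod.fst) :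
    ((l.map (fun p => if p.1 == level then (level, text) else p)).filter
        (fun p => decide (p.1 ≤ level))).Perm
      ((l.filter (fun p => decide (p.1 < level))) ++ [(level, text)]) := by
  induction l with
  | nil => simp at hmem
  | cons p l ih =>
    simp only [List.map_cons, List.nodup_cons, List.mem_map] at h hmem
    by_cases hp : p.1 = level
    · have hl : ∀ q ∈ l, q.1 ≠ level := by
        intro q hq hqe
        exact h.1 ⟨q, hq, by rw [hqe, hp]⟩
      have hmap : l.map (fun p => if p.1 == level then (level, text) else p) = l := by
        conv_rhs => rw [← List.map_id l]
        apply List.map_congr_left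
        intro q hq; simp [hl q hq]
      have hfl : l.filter (fun p => decide (p.1 ≤ level)) = l.filter (fun p => decide (p.1 < level)) := by
        apply List.filter_congr
        intro q hq
        have := hl q hq
        simp only [decide_eq_decide]
        omega
      simp only [List.map_cons, hp, beq_self_eq_true, if_pos, List.filter_cons, hmap, hfl]
      rw [if_pos (by simp), if_neg (by simp)]
      exact (List.perm_append_singleton _ _).symm
    · simp only [List.map_cons]
      rw [if_neg (by simp [hp] : ¬ ((p.1 == level) = true))]
      simp only [List.filter_cons]
      rcases List.mem_cons.mp hmem with heq | hmem'
      · exact absurd heq.symm hp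
      by_cases hple : p.1 ≤ level
      · have hplt : p.1 < level := lt_of_le_of_ne hple hp
        rw [if_pos (by simpa using hple), if_pos (by simpa using hplt)]
        simpa using (ih h.2 hmem').cons p
      · rw [if_neg (by simpa using hple), if_neg (by simp; omega)]
        exact ih h.2 hmem'

theorem pvAStep_perm (d : PySem.Dict Int String) (hnd : d.keys.Nodup) (level : Int) (text : String) :
    (pvADelDeeper level (d.insert level text).keys (d.insert level text)).items.Perm
      ((d.items.filter (fun p => decide (p.1 < level))) ++ [(level, text)]) := by
  rw [pvItems_delDeeper]
  have hfe : (d.insert level text).items.filter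
      (fun p => !(decide (p.1 ∈ (d.insert level text).keys) && decide (level < p.1)))
      = (d.insert level text).items.filter (fun p => decide (p.1 ≤ level)) := by
    apply List.filter_congr
    intro p hp
    have hk : p.1 ∈ (d.insert level text).keys := List.mem_map_of_mem hp
    simp only [hk, decide_true, Bool.true_and, ← decide_not, decide_eq_decide]
    omega
  rw [hfe]
  by_cases hc : d.contains level
  · rw [PySem.Dict.items_insert_of_contains d text hc]
    have hmem : level ∈ d.items.map Prod.fst :=
      (PySem.Dict.contains_iff_mem_keys d level).mp hc
    exact pvReplace_filter_perm d.items level text hnd hmem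
  · rw [PySem.Dict.items_insert_of_not_contains d text (by simpa using hc)]
    rw [List.filter_append]
    have hne : ∀ p ∈ d.items, p.1 ≠ level := by
      intro p hp hpe
      exact hc ((PySem.Dict.contains_iff_mem_keys d level).mpr
        (hpe ▸ List.mem_map_of_mem hp))
    have : d.items.filter (fun p => decide (p.1 ≤ level))
        = d.items.filter (fun p => decide (p.1 < level)) := by
      apply List.filter_congr
      intro p hp
      have := hne p hp
      simp only [decide_eq_decide]
      omega
    rw [this]
    simp

theorem pvStkPop_eq_filter (level : Int) (s : List (Int × String))
    (hs : s.Pairwise (fun a b => b.1 < a.1)) :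
    pvStkPop level s = s.filter (fun p => decide (p.1 ≤ level)) := by
  induction s with
  | nil => rfl
  | cons p s ih =>
    obtain ⟨l, t⟩ := p
    rw [List.pairwise_cons] at hs
    simp only [pvStkPop, List.filter_cons]
    by_cases hl : l > level
    · rw [if_pos hl, if_neg (by simp; omega), ih hs.2]
    · rw [if_neg hl, if_pos (by simp; omega)]
      congr 1
      symm
      apply List.filter_eq_self.mpr
      intro q hq
      have := hs.1 q hq
      simp only [decide_eq_true_eq]
      omega

theorem pvStkStep_eq (level : Int) (text : String) (s : List (Int × String))
    (hs : s.Pairwise (fun a b => b.1 < a.1)) :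
    pvStkStep level text s = (level, text) :: s.filter (fun p => decide (p.1 < level)) := by
  have hfl : s.filter (fun p => decide (p.1 < level))
      = (s.filter (fun p => decide (p.1 ≤ level))).filter (fun p => decide (p.1 < level)) := by
    rw [List.filter_filter]
    apply List.filter_congr
    intro p _
    by_cases h : p.1 < level <;> simp [h]
    omega
  unfold pvStkStep
  rw [pvStkPop_eq_filter level s hs]
  cases hf : s.filter (fun p => decide (p.1 ≤ level)) with
  | nil => rw [hfl, hf]; rfl
  | cons q tail =>
    obtain ⟨l, t⟩ := q
    have hpw : ((l, t) :: tail).Pairwise (fun a b : Int × String => b.1 < a.1) :=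
      hf ▸ hs.filter _
    rw [List.pairwise_cons] at hpw
    have htail : tail.filter (fun p => decide (p.1 < l)) = tail :=
      List.filter_eq_self.mpr (fun q hq => by have := hpw.1 q hq; simp; omega)
    rw [hfl, hf]
    show (if l = level then (level, text) :: tail else (level, text) :: (l, t) :: tail)
        = (level, text) :: ((l, t) :: tail).filter (fun p => decide (p.1 < level))
    by_cases hl : l = level
    · subst hl
      rw [if_pos rfl]
      simp only [List.filter_cons]
      rw [if_neg (by simp)]
      rw [htail]
    · rw [if_neg hl]
      have hllt : l < level := by
        have hmem : (l, t) ∈ s.filter (fun p => decide (p.1 ≤ level)) := by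
          rw [hf]; exact List.mem_cons_self
        have := (List.mem_filter.mp hmem).2
        simp at this
        omega
      simp only [List.filter_cons]
      rw [if_pos (by simp; omega)]
      congr 2
      symm
      apply List.filter_eq_self.mpr
      intro q hq
      have := hpw.1 q hq
      simp only [decide_eq_true_eq]
      omega

theorem pvInv_step (d : PySem.Dict Int String) (s : List (Int × String)) (level : Int) (text : String)
    (h : pvInv d s) :
    pvInv (pvADelDeeper level (d.insert level text).keys (d.insert level text))
      (pvStkStep level text s) := by
  obtain ⟨hnd, hpw, hperm⟩ := h
  rw [pvStkStep_eq level text s hpw]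
  refine ⟨?_, ?_, ?_⟩
  · show ((pvADelDeeper level (d.insert level text).keys (d.insert level text)).items.map
      (fun x => x.1)).Nodup
    rw [pvItems_delDeeper]
    have hsub : List.Sublist
        (((d.insert level text).items.filter
          (fun p => !(decide (p.1 ∈ (d.insert level text).keys) && decide (level < p.1)))).map
            (fun x => x.1))
        ((d.insert level text).items.map (fun x => x.1)) :=
      List.Sublist.map _ (List.filter_sublist (l := (d.insert level text).items))
    exact (PySem.Dict.nodup_keys_insert d level text hnd).sublist hsub
  · refine List.pairwise_cons.mpr ⟨?_, hpw.filter _⟩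
    intro q hq
    have := (List.mem_filter.mp hq).2
    simpa using this
  · rw [List.reverse_cons, ← List.filter_reverse]
    exact ((hperm.filter _).append_right [(level, text)]).trans
      (pvAStep_perm d hnd level text).symm

theorem pvInv_loop (rest : List (Int × String × Int)) (position : Int)
    (d : PySem.Dict Int String) (s : List (Int × String)) (h : pvInv d s) :
    pvInv (pvALoop position rest d) (pvStkLoop position rest s) := by
  induction rest generalizing d s with
  | nil => exact h
  | cons hd tl ih =>
    obtain ⟨level, text, hpos⟩ := hd
    simp only [pvALoop, pvStkLoop]
    split_ifs with hle
    · exact h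
    · exact ih _ _ (pvInv_step d s level text h)

theorem pvFinal_eq (d : PySem.Dict Int String) (s : List (Int × String)) (h : pvInv d s) :
    (if d.items = [] then ""
     else PySem.Str.join " > " ((PySem.List.sorted d.keys (fun x => x) false).map (fun l => d.getD l "")))
      = PySem.Str.join " > " (s.reverse.map (fun p => p.2)) := by
  obtain ⟨hnd, hpw, hperm⟩ := h
  by_cases hni : d.items = []
  · rw [if_pos hni]
    rw [hni] at hperm
    rw [List.reverse_eq_nil_iff.mp hperm.eq_nil]
    rfl
  · rw [if_neg hni]
    have hkeys : PySem.List.sorted d.keys (fun x => x) false = s.reverse.map Prod.fst := by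
      apply PySem.List.sorted_eq_of_perm_of_pairwise_lt
      · exact hperm.map Prod.fst
      · exact List.pairwise_map.mpr (List.pairwise_reverse.mpr hpw)
    rw [hkeys, List.map_map]
    congr 1
    apply List.map_congr_left
    intro p hp
    exact PySem.Dict.getD_of_mem_items d (hperm.subset hp) hnd ""

-- the break-loop over headings is the fold of the step over the truncated prefix
theorem pvStkLoop_eq_fold (position : Int) (hs : List (Int × String × Int))
    (s : List (Int × String)) :
    pvStkLoop position hs s
      = (pvPrefix position hs).foldl (fun s h => pvStkStep h.1 h.2.1 s) s := by
  induction hs generalizing s with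
  | nil => rfl
  | cons h rest ih =>
    obtain ⟨level, text, hpos⟩ := h
    simp only [pvStkLoop, pvPrefix]
    by_cases hgt : hpos > position
    · simp [hgt]
    · simp only [hgt, if_false, List.foldl_cons]
      exact ih _

theorem pvMMin_eq_none_iff (l : List (Int × String × Int)) : pvMMin l = none ↔ l = [] := by
  cases l with
  | nil => simp [pvMMin]
  | cons h rest =>
    simp only [pvMMin, pvOMin]
    cases pvMMin rest <;> simp

theorem pvStkStep_pairwise (level : Int) (text : String) (s : List (Int × String))
    (hs : s.Pairwise (fun a b => b.1 < a.1)) :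
    (pvStkStep level text s).Pairwise (fun a b => b.1 < a.1) := by
  rw [pvStkStep_eq level text s hs]
  refine List.pairwise_cons.mpr ⟨?_, hs.filter _⟩
  intro q hq
  have := (List.mem_filter.mp hq).2
  simpa using this

-- filtering below a and then by pvKeep m is one filter by the combined minimum
theorem pvFilter_keep_omin (a : Int) (m : Option Int) (s : List (Int × String)) :
    (s.filter (fun p => decide (p.1 < a))).filter (pvKeep m)
      = s.filter (pvKeep (pvOMin (some a) m)) := by
  rw [List.filter_filter]
  apply List.filter_congr
  intro p _
  cases m with
  | none => simp [pvKeep, pvOMin]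
  | some v =>
    simp only [pvKeep_some, pvOMin]
    rw [← Bool.decide_and, decide_eq_decide]
    omega

theorem pvKeep_none_filter (l : List (Int × String)) : l.filter (pvKeep none) = l := by
  apply List.filter_eq_self.mpr
  intro q _
  rfl

-- the stack after folding a list equals the suffix-minima survivors of that list,
-- on top of the initial-stack entries strictly below the list's minimum level
theorem pvFold_eq_surv (P : List (Int × String × Int)) (s : List (Int × String))
    (hs : s.Pairwise (fun a b => b.1 < a.1)) :
    P.foldl (fun s h => pvStkStep h.1 h.2.1 s) s
      = pvSurv P ++ s.filter (pvKeep (pvMMin P)) := by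
  induction P generalizing s with
  | nil => simp [pvSurv, pvMMin, pvKeep_none_filter]
  | cons x Q ih =>
    simp only [List.foldl_cons]
    rw [ih _ (pvStkStep_pairwise x.1 x.2.1 s hs), pvStkStep_eq x.1 x.2.1 s hs,
        List.filter_cons, pvFilter_keep_omin]
    cases hQ : pvMMin Q with
    | none =>
      have hQn : Q = [] := (pvMMin_eq_none_iff Q).mp hQ
      subst hQn
      simp [pvSurv, pvMMin, pvOMin, pvKeep]
    | some v =>
      simp only [pvSurv, pvMMin, hQ, pvOMin]
      by_cases hxv : x.1 < v
      · have hmin : min x.1 v = x.1 := by omega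
        simp [pvKeep, hxv, hmin]
      · have hmin : min x.1 v = v := by omega
        simp [pvKeep, hxv, hmin]

-- B's backward min-scan over the reversed prefix collects exactly the survivors' texts
theorem pvScan_eq_surv (P : List (Int × String × Int)) (m : Option Int) (parts : List String) :
    P.reverse.foldl pvScanStep (m, parts)
      = (pvOMin m (pvMMin P), parts ++ ((pvSurv P).filter (pvKeep m)).map Prod.snd) := by
  induction P generalizing m parts with
  | nil => cases m <;> simp [pvMMin, pvOMin, pvSurv]
  | cons x Q ih =>
    simp only [List.reverse_cons, List.foldl_append, List.foldl_cons, List.foldl_nil]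
    rw [ih m parts]
    cases hQ : pvMMin Q with
    | none =>
      have : Q = [] := (pvMMin_eq_none_iff Q).mp hQ
      subst this
      cases m with
      | none =>
        simp [pvScanStep, pvSurv, pvMMin, pvOMin, pvKeep]
      | some w =>
        simp only [pvScanStep, pvSurv, pvMMin, pvOMin]
        by_cases hxw : x.1 < w
        · rw [if_pos (by simpa using hxw)]
          have : min w x.1 = x.1 := by omega
          simp [this, hxw, pvKeep_some]
        · rw [if_neg (by simpa using hxw)]
          have : min w x.1 = w := by omega
          simp [this, hxw, pvKeep_some]
    | some v =>
      cases m with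
      | none =>
        simp only [pvScanStep, pvSurv, pvMMin, hQ, pvOMin]
        by_cases hxv : x.1 < v
        · rw [if_pos (by simpa using hxv)]
          have : min x.1 v = x.1 := by omega
          simp [this, hxv, pvKeep_none, pvKeep_none_filter, List.filter_append]
        · rw [if_neg (by simpa using hxv)]
          have : min x.1 v = v := by omega
          simp [this, hxv, pvKeep_none_filter]
      | some w =>
        simp only [pvScanStep, pvSurv, pvMMin, hQ, pvOMin]
        by_cases hx : x.1 < min w v
        · rw [if_pos (by simpa using hx)]
          have h1 : min w (min x.1 v) = x.1 := by omega
          have h2 : x.1 < v := by omega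
          have h3 : x.1 < w := by omega
          simp [h1, h2, h3, pvKeep_some, List.filter_append]
        · rw [if_neg (by simpa using hx)]
          by_cases hxv : x.1 < v
          · have h3 : ¬ x.1 < w := by omega
            have h1 : min w (min x.1 v) = min w v := by omega
            simp [h1, hxv, h3, pvKeep_some, List.filter_append]
          · have h1 : min w (min x.1 v) = min w v := by omega
            simp [h1, hxv]

-- ===== VERDICT (by name: the statement is the Claim_ definition above) =====
theorem get_heading_context_for_position_py_spec : Claim_equal_get_heading_context_for_position_py := by
  intro headings position _
  unfold Spec_get_heading_context_for_position_py
  unfold get_heading_context_for_position_py get_heading_context_for_position_py_alt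
  have hA := pvFinal_eq _ _ (pvInv_loop headings position PySem.Dict.empty []
    ⟨PySem.Dict.nodup_keys_empty, List.Pairwise.nil, List.Perm.refl _⟩)
  rw [hA]
  rw [pvStkLoop_eq_fold position headings []]
  rw [pvFold_eq_surv (pvPrefix position headings) []
    (by exact List.Pairwise.nil)]
  rw [pvScan_eq_surv (pvPrefix position headings) none []]
  simp [pvKeep_none_filter, List.map_reverse]
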